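-- pv_equiv track=rewrite | github.com/aqemery/advent-of-code | 2023/21.py | part1
-- ===== SOURCE A (Python) =====
-- from collections import deque
--
-- def part1(data):
--     start = None
--     gardens = set()
--     for y, line in enumerate(data):
--         for x, c in enumerate(line):
--             if c == "S":
--                 start = (x, y)
--             if c == ".":
--                 gardens.add((x, y))
--
--     q = deque([start])
--     visited = {start: 0}
--     dirs = [(0, -1), (0, 1), (-1, 0), (1, 0)]
--     while q:
--         pos = q.popleft()
--         for dx, dy in dirs:
--             nex_pos = (pos[0] + dx, pos[1] + dy)
--             if nex_pos in gardens and nex_pos not in visited: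
--                 visited[nex_pos] = visited[pos] + 1
--                 q.append(nex_pos)
--
--     return sum(1 for v in visited.values() if v % 2 == 0 and v <= 64)
-- ===== SOURCE B (Python) =====
-- def part1(data):
--     start = None
--     gardens = set()
--     for y, line in enumerate(data):
--         for x, c in enumerate(line):
--             if c == "S":
--                 start = (x, y)
--             elif c == ".":
--                 gardens.add((x, y))
--
--     visited = {start}
--     current = [start]
--     total = 1  # the start cell, at even distance 0
--     for step in range(1, 65):
--         frontier = []
--         for x, y in current:
--             for n in ((x, y - 1), (x, y + 1), (x - 1, y), (x + 1, y)):
--                 if n in gardens and n not in visited: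
--                     visited.add(n)
--                     frontier.append(n)
--         if step % 2 == 0:
--             total += len(frontier)
--         current = frontier
--     return total
-- ===== Notes on version B (the rewrite author's own statement) =====
-- stated objective: alternative
-- what changed: Replaced the deque-based per-node BFS that floods the entire component and then filters distances with a level-synchronous frontier BFS that runs exactly 64 rounds, accumulating the count of even-level cells on the fly (no distance dictionary, no final scan).
import Mathlib
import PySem

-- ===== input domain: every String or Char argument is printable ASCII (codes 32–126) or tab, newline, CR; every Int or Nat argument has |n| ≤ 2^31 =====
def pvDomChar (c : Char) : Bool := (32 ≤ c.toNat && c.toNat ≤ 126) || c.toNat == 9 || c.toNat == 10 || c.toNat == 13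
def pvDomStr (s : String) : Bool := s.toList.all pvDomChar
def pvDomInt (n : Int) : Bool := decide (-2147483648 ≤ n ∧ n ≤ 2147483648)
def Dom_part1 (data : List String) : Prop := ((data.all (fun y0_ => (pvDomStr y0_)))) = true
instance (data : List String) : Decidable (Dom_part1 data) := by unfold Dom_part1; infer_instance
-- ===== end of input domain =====

-- B replaces A's whole-component queue BFS + final distance filter by a 64-round
-- level-synchronous frontier BFS that counts even levels as it goes (alternative decomposition).

-- ===== PORT A =====
-- parse: two sequential ifs per character, exactly as in A
def pvScanChar (y : Int) (st : Option (Int × Int) × PySem.Set (Int × Int)) (xc : Int × Char) :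
    Option (Int × Int) × PySem.Set (Int × Int) :=
  let st1 := if xc.2 == 'S' then (some (xc.1, y), st.2) else st
  if xc.2 == '.' then (st1.1, PySem.Set.add st1.2 (xc.1, y)) else st1

def pvScanLine (st : Option (Int × Int) × PySem.Set (Int × Int)) (yl : Int × String) :
    Option (Int × Int) × PySem.Set (Int × Int) :=
  (PySem.List.enumerate yl.2.toList 0).foldl (pvScanChar yl.1) st

def pvParseA (data : List String) : Option (Int × Int) × PySem.Set (Int × Int) :=
  (PySem.List.enumerate data 0).foldl pvScanLine (none, PySem.Set.empty)

def pvDirs : List (Int × Int) := [(0, -1), (0, 1), (-1, 0), (1, 0)]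

-- one neighbour test of A's inner `for dx, dy in dirs` loop
def pvStepA (G : PySem.Set (Int × Int)) (pos : Int × Int)
    (st : List (Int × Int) × PySem.Dict (Int × Int) Int) (dir : Int × Int) :
    List (Int × Int) × PySem.Dict (Int × Int) Int :=
  let n := (pos.1 + dir.1, pos.2 + dir.2)
  if PySem.Set.contains G n && !st.2.contains n then
    (st.1 ++ [n], st.2.insert n (st.2.getD pos 0 + 1))
  else st

def pvNodeA (G : PySem.Set (Int × Int)) (st : List (Int × Int) × PySem.Dict (Int × Int) Int)
    (pos : Int × Int) : List (Int × Int) × PySem.Dict (Int × Int) Int :=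
  pvDirs.foldl (pvStepA G pos) st

-- termination measure for the while-loop: queue length + undiscovered gardens
def pvMu (G : PySem.Set (Int × Int)) (st : List (Int × Int) × PySem.Dict (Int × Int) Int) : Nat :=
  st.1.length + (G.filter (fun g => !st.2.contains g)).length

theorem pvAndSplit {a b : Bool} (h : (a && b) = true) : a = true ∧ b = true := by
  cases a <;> cases b <;> simp_all

theorem pvNotTrue {b : Bool} (h : (!b) = true) : b = false := by
  cases b <;> simp_all

theorem pvStepA_mu (G : PySem.Set (Int × Int)) (pos : Int × Int)
    (st : List (Int × Int) × PySem.Dict (Int × Int) Int) (dir : Int × Int) :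
    pvMu G (pvStepA G pos st dir) ≤ pvMu G st := by
  simp only [pvStepA]
  by_cases h : (PySem.Set.contains G (pos.1 + dir.1, pos.2 + dir.2)
      && !st.2.contains (pos.1 + dir.1, pos.2 + dir.2)) = true
  · have h1 : PySem.Set.contains G (pos.1 + dir.1, pos.2 + dir.2) = true := (pvAndSplit h).1
    have h2 : st.2.contains (pos.1 + dir.1, pos.2 + dir.2) = false := pvNotTrue (pvAndSplit h).2
    rw [if_pos h]
    set n : Int × Int := (pos.1 + dir.1, pos.2 + dir.2) with hn
    set w : Int := st.2.getD pos 0 + 1 with hw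
    have hG : n ∈ (G : List (Int × Int)) := (PySem.Set.contains_iff _ _).mp h1
    obtain ⟨s1, t1, hst⟩ := List.append_of_mem hG
    have hmono : ∀ (l : List (Int × Int)),
        (l.filter (fun g => !(st.2.insert n w).contains g)).length ≤
        (l.filter (fun g => !st.2.contains g)).length := by
      intro l
      have himp : ∀ g ∈ l, (!(st.2.insert n w).contains g) = true → (!st.2.contains g) = true := by
        intro g _ hg
        rw [PySem.Dict.contains_insert] at hg
        have := pvNotTrue hg
        cases hc : st.2.contains g
        · simp
        · rw [hc] at this; simp at this
      have := List.countP_mono_left (l := l) himp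
      simpa [List.countP_eq_length_filter] using this
    have hnewn : (!(st.2.insert n w).contains n) = false := by
      rw [PySem.Dict.contains_insert_self]; rfl
    have holdn : (!st.2.contains n) = true := by rw [h2]; rfl
    have m1 := hmono s1
    have m2 := hmono t1
    simp only [pvMu, hst, List.length_append, List.length_cons, List.filter_append,
      List.filter_cons, hnewn, holdn, if_true, List.length_nil]
    rw [if_neg (show ¬(false = true) by decide)]
    omega
  · rw [if_neg h]

theorem pvNodeA_mu (G : PySem.Set (Int × Int)) (pos : Int × Int)
    (l : List (Int × Int)) (st : List (Int × Int) × PySem.Dict (Int × Int) Int) :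
    pvMu G (l.foldl (pvStepA G pos) st) ≤ pvMu G st := by
  induction l generalizing st with
  | nil => exact le_refl _
  | cons dir l ih => exact le_trans (ih _) (pvStepA_mu G pos st dir)

-- A's while-loop over the deque (termination: pvMu strictly drops at each pop)
def pvBfsA (G : PySem.Set (Int × Int)) :
    List (Int × Int) → PySem.Dict (Int × Int) Int → PySem.Dict (Int × Int) Int
  | [], v => v
  | pos :: q, v =>
    let st := pvNodeA G (q, v) pos
    pvBfsA G st.1 st.2
  termination_by q v => pvMu G (q, v)
  decreasing_by
    have h := pvNodeA_mu G pos pvDirs (q, v)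
    simp only [pvNodeA] at *
    simp only [pvMu] at h ⊢
    simp only [List.length_cons]
    omega

-- sum(1 for v in visited.values() if v % 2 == 0 and v <= 64)
def pvCountf (l : List Int) : Int :=
  (l.countP (fun x => PySem.Int.mod x 2 == 0 && decide (x ≤ 64)) : Int)

def part1 (data : List String) : Int :=
  let p := pvParseA data
  match p.1 with
  | none => 0  -- Python raises TypeError here (start is None); excluded by Pre_part1
  | some s => pvCountf (pvBfsA p.2 [s] (PySem.Dict.empty.insert s 0)).values

-- ===== PORT B =====
-- parse: if/elif per character, exactly as in B
def pvScanCharB (y : Int) (st : Option (Int × Int) × PySem.Set (Int × Int)) (xc : Int × Char) :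
    Option (Int × Int) × PySem.Set (Int × Int) :=
  if xc.2 == 'S' then (some (xc.1, y), st.2)
  else if xc.2 == '.' then (st.1, PySem.Set.add st.2 (xc.1, y))
  else st

def pvScanLineB (st : Option (Int × Int) × PySem.Set (Int × Int)) (yl : Int × String) :
    Option (Int × Int) × PySem.Set (Int × Int) :=
  (PySem.List.enumerate yl.2.toList 0).foldl (pvScanCharB yl.1) st

def pvParseB (data : List String) : Option (Int × Int) × PySem.Set (Int × Int) :=
  (PySem.List.enumerate data 0).foldl pvScanLineB (none, PySem.Set.empty)

-- the four neighbour cells, as B spells them out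
def pvNbrs (pos : Int × Int) : List (Int × Int) :=
  [(pos.1, pos.2 - 1), (pos.1, pos.2 + 1), (pos.1 - 1, pos.2), (pos.1 + 1, pos.2)]

def pvStepB (G : PySem.Set (Int × Int)) (fv : List (Int × Int) × PySem.Set (Int × Int))
    (n : Int × Int) : List (Int × Int) × PySem.Set (Int × Int) :=
  if PySem.Set.contains G n && !PySem.Set.contains fv.2 n then
    (fv.1 ++ [n], PySem.Set.add fv.2 n)
  else fv

def pvNodeB (G : PySem.Set (Int × Int)) (fv : List (Int × Int) × PySem.Set (Int × Int))
    (pos : Int × Int) : List (Int × Int) × PySem.Set (Int × Int) :=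
  (pvNbrs pos).foldl (pvStepB G) fv

-- one round of the level loop: build next frontier, count it on even steps
def pvOuterB (G : PySem.Set (Int × Int))
    (st : List (Int × Int) × PySem.Set (Int × Int) × Int) (step : Int) :
    List (Int × Int) × PySem.Set (Int × Int) × Int :=
  let fr := st.1.foldl (pvNodeB G) ([], st.2.1)
  (fr.1, fr.2, st.2.2 + if PySem.Int.mod step 2 == 0 then (fr.1.length : Int) else 0)

def part1_alt (data : List String) : Int :=
  let p := pvParseB data
  match p.1 with
  | none => 0  -- Python raises TypeError here (unpacking None); excluded by Pre_part1
  | some s =>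
    ((PySem.List.pyRange 1 65 1).foldl (pvOuterB p.2)
      ([s], PySem.Set.ofList [s], 1)).2.2

-- ===== PRECONDITION & SPEC =====
-- Pre_ excludes exactly the grids with no 'S' cell: there the Python A raises TypeError
-- (start stays None and `pos[0]` fails).
def Pre_part1 (data : List String) : Prop := ∃ line ∈ data, 'S' ∈ line.toList
instance (data : List String) : Decidable (Pre_part1 data) := by unfold Pre_part1; infer_instance

def pvWitness_part1 : List String := ["S."]

def Spec_part1 (data : List String) (out : Int) : Prop := out = part1_alt data
instance (data : List String) (out : Int) : Decidable (Spec_part1 data out) := by unfold Spec_part1; infer_instance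

-- ===== CLAIM (what is proved, stated in full; the proofs are below) =====
def Claim_equal_part1 : Prop := ∀ (data : List String), Dom_part1 data → Pre_part1 data → Spec_part1 data (part1 data)

-- ===== LEMMAS AND PROOFS =====

-- the two parses agree
theorem pvScanChar_eq (y : Int) (st : Option (Int × Int) × PySem.Set (Int × Int)) (xc : Int × Char) :
    pvScanChar y st xc = pvScanCharB y st xc := by
  by_cases h1 : xc.2 = 'S'
  · by_cases h2 : xc.2 = '.'
    · rw [h1] at h2; exact absurd h2 (by decide)
    · simp [pvScanChar, pvScanCharB, h1]
  · by_cases h2 : xc.2 = '.' <;> simp [pvScanChar, pvScanCharB, h1, h2]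

theorem pvParse_eq (data : List String) : pvParseA data = pvParseB data := by
  have hchar : ∀ y, pvScanChar y = pvScanCharB y :=
    fun y => funext fun st => funext fun xc => pvScanChar_eq y st xc
  have hline : pvScanLine = pvScanLineB := by
    funext st yl
    simp [pvScanLine, pvScanLineB, hchar]
  simp [pvParseA, pvParseB, hline]

-- a found start is never lost
theorem pvScanChar_some (y : Int) (st : Option (Int × Int) × PySem.Set (Int × Int))
    (xc : Int × Char) (h : st.1.isSome = true) : ((pvScanChar y st xc).1).isSome = true := by
  by_cases h1 : xc.2 = 'S' <;> by_cases h2 : xc.2 = '.' <;>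
    simp [pvScanChar, h1, h2, h]

theorem pvFoldChar_some (y : Int) (l : List (Int × Char))
    (st : Option (Int × Int) × PySem.Set (Int × Int)) (h : st.1.isSome = true) :
    ((l.foldl (pvScanChar y) st).1).isSome = true := by
  induction l generalizing st with
  | nil => exact h
  | cons xc l ih => exact ih _ (pvScanChar_some y st xc h)

theorem pvFoldChar_hit (y : Int) :
    ∀ (cs : List Char) (i : Int) (st : Option (Int × Int) × PySem.Set (Int × Int)),
    'S' ∈ cs → (((PySem.List.enumerate cs i).foldl (pvScanChar y) st).1).isSome = true := by
  intro cs
  induction cs with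
  | nil => intro i st h; simp at h
  | cons c cs ih =>
    intro i st h
    rw [PySem.List.enumerate_cons, List.foldl_cons]
    rcases List.mem_cons.mp h with h' | h'
    · exact pvFoldChar_some y _ _ (by simp [pvScanChar, ← h'])
    · exact ih (i + 1) _ h'

theorem pvScanLine_some (st : Option (Int × Int) × PySem.Set (Int × Int)) (yl : Int × String)
    (h : st.1.isSome = true) : ((pvScanLine st yl).1).isSome = true :=
  pvFoldChar_some yl.1 _ st h

theorem pvFoldLine_some (l : List (Int × String))
    (st : Option (Int × Int) × PySem.Set (Int × Int)) (h : st.1.isSome = true) :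
    ((l.foldl pvScanLine st).1).isSome = true := by
  induction l generalizing st with
  | nil => exact h
  | cons yl l ih => exact ih _ (pvScanLine_some st yl h)

theorem pvFoldLine_hit :
    ∀ (ls : List String) (i : Int) (st : Option (Int × Int) × PySem.Set (Int × Int)),
    (∃ line ∈ ls, 'S' ∈ line.toList) →
    (((PySem.List.enumerate ls i).foldl pvScanLine st).1).isSome = true := by
  intro ls
  induction ls with
  | nil => intro i st h; simp at h
  | cons line ls ih =>
    intro i st h
    rw [PySem.List.enumerate_cons, List.foldl_cons]
    rcases h with ⟨l0, hl0, hS⟩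
    rcases List.mem_cons.mp hl0 with h' | h'
    · subst h'
      exact pvFoldLine_some _ _ (pvFoldChar_hit i _ 0 _ hS)
    · exact ih (i + 1) _ ⟨l0, h', hS⟩

-- Pre_ implies the parse found a start
theorem pvParseA_isSome (data : List String) (h : Pre_part1 data) : (pvParseA data).1.isSome :=
  pvFoldLine_hit data 0 _ h

-- proof-side: A's flood restratified into levels (per node it is exactly pvNodeA)
def pvLevels (G : PySem.Set (Int × Int)) :
    List (Int × Int) → List (Int × Int) → PySem.Dict (Int × Int) Int → Int →
    PySem.Dict (Int × Int) Int
  | [], [], v, _ => v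
  | [], x :: nxt, v, d => pvLevels G (x :: nxt) [] v (d + 1)
  | pos :: cur, nxt, v, d =>
    let st := pvNodeA G (nxt, v) pos
    pvLevels G cur st.1 st.2 d
  termination_by cur nxt v _ => (pvMu G (cur ++ nxt, v), if cur = [] then 1 else 0)
  decreasing_by
    · simp only [List.append_nil, List.nil_append]
      exact Prod.Lex.right _ (by simp)
    · have h := pvNodeA_mu G pos pvDirs (nxt, v)
      refine Prod.Lex.left _ _ ?_
      simp only [pvNodeA, pvMu, List.length_append, List.length_cons] at h ⊢
      omega

theorem pvLevels_shift (G : PySem.Set (Int × Int)) (nxt : List (Int × Int))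
    (v : PySem.Dict (Int × Int) Int) (d : Int) :
    pvLevels G [] nxt v d = pvLevels G nxt [] v (d + 1) := by
  cases nxt with
  | nil => simp only [pvLevels]
  | cons x nxt => simp only [pvLevels]

-- queue prefix is inert through one node's neighbour fold
theorem pvNodeA_prefix (G : PySem.Set (Int × Int)) (pos : Int × Int) (l : List (Int × Int))
    (a b : List (Int × Int)) (v : PySem.Dict (Int × Int) Int) :
    l.foldl (pvStepA G pos) (a ++ b, v) =
      (a ++ (l.foldl (pvStepA G pos) (b, v)).1, (l.foldl (pvStepA G pos) (b, v)).2) := by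
  induction l generalizing b v with
  | nil => simp
  | cons dir l ih =>
    simp only [List.foldl_cons]
    by_cases h : (PySem.Set.contains G (pos.1 + dir.1, pos.2 + dir.2)
        && !v.contains (pos.1 + dir.1, pos.2 + dir.2)) = true
    · have e1 : pvStepA G pos (a ++ b, v) dir =
          (a ++ (b ++ [(pos.1 + dir.1, pos.2 + dir.2)]),
           v.insert (pos.1 + dir.1, pos.2 + dir.2) (v.getD pos 0 + 1)) := by
        simp only [pvStepA]
        rw [if_pos h, List.append_assoc]
      have e2 : pvStepA G pos (b, v) dir =
          (b ++ [(pos.1 + dir.1, pos.2 + dir.2)],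
           v.insert (pos.1 + dir.1, pos.2 + dir.2) (v.getD pos 0 + 1)) := by
        simp only [pvStepA]
        rw [if_pos h]
      rw [e1, e2, ih]
    · have e1 : pvStepA G pos (a ++ b, v) dir = (a ++ b, v) := by
        simp only [pvStepA]
        rw [if_neg h]
      have e2 : pvStepA G pos (b, v) dir = (b, v) := by
        simp only [pvStepA]
        rw [if_neg h]
      rw [e1, e2, ih]

-- node invariant: lookups are preserved, new cells get value d+1, values list grows by d+1's
theorem pvNodeA_inv (G : PySem.Set (Int × Int)) (pos : Int × Int) (d : Int)
    (v0 : PySem.Dict (Int × Int) Int) (hpos : v0.get? pos = some d) :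
    ∀ (l : List (Int × Int)) (st : List (Int × Int) × PySem.Dict (Int × Int) Int),
    (∀ k x, v0.get? k = some x → st.2.get? k = some x) →
    (∀ x ∈ st.1, st.2.get? x = some (d + 1)) →
    (∀ k x, v0.get? k = some x → (l.foldl (pvStepA G pos) st).2.get? k = some x) ∧
    (∀ x ∈ (l.foldl (pvStepA G pos) st).1, (l.foldl (pvStepA G pos) st).2.get? x = some (d + 1)) ∧
    (∃ new : List (Int × Int), (l.foldl (pvStepA G pos) st).1 = st.1 ++ new ∧
      (l.foldl (pvStepA G pos) st).2.values = st.2.values ++ List.replicate new.length (d + 1)) := by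
  intro l
  induction l with
  | nil => intro st hpres hnxt; exact ⟨hpres, hnxt, [], by simp, by simp⟩
  | cons dir l ih =>
    intro st hpres hnxt
    simp only [List.foldl_cons]
    by_cases h : (PySem.Set.contains G (pos.1 + dir.1, pos.2 + dir.2)
        && !st.2.contains (pos.1 + dir.1, pos.2 + dir.2)) = true
    · have hcont : st.2.contains (pos.1 + dir.1, pos.2 + dir.2) = false :=
        pvNotTrue (pvAndSplit h).2
      have hnone : st.2.get? (pos.1 + dir.1, pos.2 + dir.2) = none := by
        have hiso : (st.2.get? (pos.1 + dir.1, pos.2 + dir.2)).isSome = false := by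
          rw [← PySem.Dict.contains_eq_isSome_get?]; exact hcont
        cases hx : st.2.get? (pos.1 + dir.1, pos.2 + dir.2) with
        | none => rfl
        | some y => rw [hx] at hiso; simp at hiso
      have hposd : st.2.getD pos 0 = d := by
        rw [PySem.Dict.getD_eq_get?_getD, hpres pos d hpos]; rfl
      have estep : pvStepA G pos st dir =
          (st.1 ++ [(pos.1 + dir.1, pos.2 + dir.2)],
           st.2.insert (pos.1 + dir.1, pos.2 + dir.2) (d + 1)) := by
        simp only [pvStepA]
        rw [if_pos h, hposd]
      rw [estep]
      have hpres' : ∀ k x, v0.get? k = some x →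
          (st.2.insert (pos.1 + dir.1, pos.2 + dir.2) (d + 1)).get? k = some x := by
        intro k x hk
        have hkn : k ≠ (pos.1 + dir.1, pos.2 + dir.2) := by
          intro e; rw [e] at hk
          rw [hpres _ x hk] at hnone
          exact Option.some_ne_none x hnone
        rw [PySem.Dict.get?_insert_of_ne _ _ hkn]; exact hpres k x hk
      have hnxt' : ∀ x ∈ st.1 ++ [(pos.1 + dir.1, pos.2 + dir.2)],
          (st.2.insert (pos.1 + dir.1, pos.2 + dir.2) (d + 1)).get? x = some (d + 1) := by
        intro x hx
        rcases List.mem_append.mp hx with hx | hx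
        · have hxn : x ≠ (pos.1 + dir.1, pos.2 + dir.2) := by
            intro e; rw [e] at hx
            rw [hnxt _ hx] at hnone
            exact Option.some_ne_none _ hnone
          rw [PySem.Dict.get?_insert_of_ne _ _ hxn]; exact hnxt x hx
        · have hxe : x = (pos.1 + dir.1, pos.2 + dir.2) := by simpa using hx
          subst hxe
          exact PySem.Dict.get?_insert_self _ _ _
      have hvals' : (st.2.insert (pos.1 + dir.1, pos.2 + dir.2) (d + 1)).values =
          st.2.values ++ [d + 1] := by
        simp only [PySem.Dict.values]
        rw [PySem.Dict.items_insert_of_not_contains _ _ hcont]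
        simp
      obtain ⟨hp, hv, new', hn1, hn2⟩ :=
        ih (st.1 ++ [(pos.1 + dir.1, pos.2 + dir.2)],
          st.2.insert (pos.1 + dir.1, pos.2 + dir.2) (d + 1)) hpres' hnxt'
      refine ⟨hp, hv, (pos.1 + dir.1, pos.2 + dir.2) :: new', ?_, ?_⟩
      · rw [hn1]; simp
      · rw [hn2, hvals']
        simp [List.replicate_succ, List.length_cons]
    · have estep : pvStepA G pos st dir = st := by
        simp only [pvStepA]
        rw [if_neg h]
      rw [estep]
      exact ih st hpres hnxt

-- level invariant: the same, folded over a whole frontier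
theorem pvLevelA_inv (G : PySem.Set (Int × Int)) (d : Int) (v0 : PySem.Dict (Int × Int) Int) :
    ∀ (cur : List (Int × Int)) (st : List (Int × Int) × PySem.Dict (Int × Int) Int),
    (∀ c ∈ cur, v0.get? c = some d) →
    (∀ k x, v0.get? k = some x → st.2.get? k = some x) →
    (∀ x ∈ st.1, st.2.get? x = some (d + 1)) →
    (∀ k x, v0.get? k = some x → (cur.foldl (pvNodeA G) st).2.get? k = some x) ∧
    (∀ x ∈ (cur.foldl (pvNodeA G) st).1, (cur.foldl (pvNodeA G) st).2.get? x = some (d + 1)) ∧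
    (∃ new : List (Int × Int), (cur.foldl (pvNodeA G) st).1 = st.1 ++ new ∧
      (cur.foldl (pvNodeA G) st).2.values = st.2.values ++ List.replicate new.length (d + 1)) := by
  intro cur
  induction cur with
  | nil => intro st _ hpres hnxt; exact ⟨hpres, hnxt, [], by simp, by simp⟩
  | cons pos cur ih =>
    intro st hcur hpres hnxt
    simp only [List.foldl_cons]
    obtain ⟨hp, hv, new1, h11, h12⟩ :=
      pvNodeA_inv G pos d v0 (hcur pos (by simp)) pvDirs st hpres hnxt
    have hcur' : ∀ c ∈ cur, v0.get? c = some d := fun c hc => hcur c (by simp [hc])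
    obtain ⟨hp2, hv2, new2, h21, h22⟩ := ih (pvNodeA G st pos) hcur' hp hv
    refine ⟨hp2, hv2, new1 ++ new2, ?_, ?_⟩
    · rw [h21]
      rw [show (pvNodeA G st pos).1 = st.1 ++ new1 from h11]
      simp
    · rw [h22]
      rw [show (pvNodeA G st pos).2.values =
          st.2.values ++ List.replicate new1.length (d + 1) from h12]
      rw [List.length_append, List.replicate_add, List.append_assoc]

-- A's queue BFS equals the level restratification
theorem pvBfsA_eq_pvLevels (G : PySem.Set (Int × Int)) (cur nxt : List (Int × Int))
    (v : PySem.Dict (Int × Int) Int) (d : Int)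
    (hcur : ∀ c ∈ cur, v.get? c = some d)
    (hnxt : ∀ x ∈ nxt, v.get? x = some (d + 1)) :
    pvBfsA G (cur ++ nxt) v = pvLevels G cur nxt v d := by
  revert hcur hnxt
  induction cur, nxt, v, d using pvLevels.induct G with
  | case1 v d =>
    intro _ _
    simp only [List.append_nil]
    simp only [pvBfsA, pvLevels]
  | case2 x nxt v d ih =>
    intro hcur hnxt
    rw [pvLevels_shift, List.nil_append]
    have := ih (fun c hc => hnxt c hc) (by intro y hy; simp at hy)
    simpa using this
  | case3 pos cur nxt v d st ih =>
    intro hcur hnxt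
    have hq : (pos :: cur) ++ nxt = pos :: (cur ++ nxt) := rfl
    rw [hq]
    simp only [pvBfsA]
    have hpref := pvNodeA_prefix G pos pvDirs cur nxt v
    obtain ⟨hp, hv, _⟩ :=
      pvNodeA_inv G pos d v (hcur pos (by simp)) pvDirs (nxt, v)
        (fun k x hk => hk) hnxt
    have hcur' : ∀ c ∈ cur, (pvNodeA G (nxt, v) pos).2.get? c = some d :=
      fun c hc => hp c d (hcur c (by simp [hc]))
    have ihx := ih hcur' hv
    simp only [pvLevels]
    simp only [pvNodeA] at hpref ihx ⊢
    rw [hpref]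
    exact ihx

-- stepping pvLevels one whole level at a time
theorem pvLevels_level (G : PySem.Set (Int × Int)) (cur nxt : List (Int × Int))
    (v : PySem.Dict (Int × Int) Int) (d : Int) :
    pvLevels G cur nxt v d =
      pvLevels G [] (cur.foldl (pvNodeA G) (nxt, v)).1 (cur.foldl (pvNodeA G) (nxt, v)).2 d := by
  induction cur generalizing nxt v with
  | nil => simp
  | cons pos cur ih =>
    simp only [pvLevels, List.foldl_cons]
    exact ih _ _

-- beyond level 64 nothing is counted
theorem pvLevels_tail (G : PySem.Set (Int × Int)) (cur nxt : List (Int × Int))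
    (v : PySem.Dict (Int × Int) Int) (d : Int) (hd : 64 ≤ d)
    (hcur : ∀ c ∈ cur, v.get? c = some d)
    (hnxt : ∀ x ∈ nxt, v.get? x = some (d + 1)) :
    pvCountf (pvLevels G cur nxt v d).values = pvCountf v.values := by
  revert hd hcur hnxt
  induction cur, nxt, v, d using pvLevels.induct G with
  | case1 v d => intro _ _ _; simp only [pvLevels]
  | case2 x nxt v d ih =>
    intro hd hcur hnxt
    rw [pvLevels_shift]
    exact ih (by omega) (fun c hc => hnxt c hc) (by intro y hy; simp at hy)
  | case3 pos cur nxt v d st ih =>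
    intro hd hcur hnxt
    simp only [pvLevels]
    obtain ⟨hp, hv, new, h1, h2⟩ :=
      pvNodeA_inv G pos d v (hcur pos (by simp)) pvDirs (nxt, v)
        (fun k x hk => hk) hnxt
    have hcur' : ∀ c ∈ cur, (pvNodeA G (nxt, v) pos).2.get? c = some d :=
      fun c hc => hp c d (hcur c (by simp [hc]))
    have ihx := ih hd hcur' hv
    rw [ihx]
    rw [show (pvNodeA G (nxt, v) pos).2.values =
        v.values ++ List.replicate new.length (d + 1) from h2]
    unfold pvCountf
    rw [List.countP_append]
    have hzero : (List.replicate new.length (d + 1)).countP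
        (fun x => PySem.Int.mod x 2 == 0 && decide (x ≤ 64)) = 0 := by
      rw [List.countP_eq_zero]
      intro a ha
      have ha' : a = d + 1 := List.eq_of_mem_replicate ha
      subst ha'
      have hdec : decide (d + 1 ≤ 64) = false := by
        rw [decide_eq_false_iff_not]; omega
      simp only [hdec, Bool.and_false]
      exact Bool.false_ne_true
    rw [hzero]
    simp

-- B's per-neighbour fold mirrors A's (same frontier, membership-equal visited)
theorem pvStepsBA (G : PySem.Set (Int × Int)) (pos : Int × Int) :
    ∀ (l : List (Int × Int)) (acc : List (Int × Int)) (vs : PySem.Set (Int × Int))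
      (v : PySem.Dict (Int × Int) Int),
    (∀ k, PySem.Set.contains vs k = v.contains k) →
    (l.foldl (fun fv dir => pvStepB G fv (pos.1 + dir.1, pos.2 + dir.2)) (acc, vs)).1 =
      (l.foldl (pvStepA G pos) (acc, v)).1 ∧
    (∀ k, PySem.Set.contains
        (l.foldl (fun fv dir => pvStepB G fv (pos.1 + dir.1, pos.2 + dir.2)) (acc, vs)).2 k =
      (l.foldl (pvStepA G pos) (acc, v)).2.contains k) := by
  intro l
  induction l with
  | nil => intro acc vs v hmem; exact ⟨rfl, hmem⟩
  | cons dir l ih =>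
    intro acc vs v hmem
    simp only [List.foldl_cons]
    by_cases h : (PySem.Set.contains G (pos.1 + dir.1, pos.2 + dir.2)
        && !v.contains (pos.1 + dir.1, pos.2 + dir.2)) = true
    · have hvsn : PySem.Set.contains vs (pos.1 + dir.1, pos.2 + dir.2) = false := by
        rw [hmem]
        exact pvNotTrue (pvAndSplit h).2
      have hcondB : (PySem.Set.contains G (pos.1 + dir.1, pos.2 + dir.2)
          && !PySem.Set.contains vs (pos.1 + dir.1, pos.2 + dir.2)) = true := by
        rw [hmem]
        exact h
      have hB : pvStepB G (acc, vs) (pos.1 + dir.1, pos.2 + dir.2) =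
          (acc ++ [(pos.1 + dir.1, pos.2 + dir.2)],
           PySem.Set.add vs (pos.1 + dir.1, pos.2 + dir.2)) := by
        simp only [pvStepB]
        rw [if_pos hcondB]
      have hA : pvStepA G pos (acc, v) dir =
          (acc ++ [(pos.1 + dir.1, pos.2 + dir.2)],
           v.insert (pos.1 + dir.1, pos.2 + dir.2) (v.getD pos 0 + 1)) := by
        simp only [pvStepA]
        rw [if_pos h]
      rw [hB, hA]
      apply ih
      intro k
      have hnotmem : (pos.1 + dir.1, pos.2 + dir.2) ∉ vs := by
        intro hc
        have := (PySem.Set.contains_iff vs _).mpr hc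
        rw [hvsn] at this
        exact Bool.noConfusion this
      rw [PySem.Set.add_of_not_mem hnotmem, PySem.Dict.contains_insert]
      have hmk : k ∈ vs ↔ v.contains k = true := by
        rw [← PySem.Set.contains_iff, hmem k]
      rw [Bool.eq_iff_iff]
      constructor
      · intro hk
        have hkm := (PySem.Set.contains_iff _ _).mp hk
        rcases List.mem_append.mp hkm with hk' | hk'
        · simp [hmk.mp hk']
        · have hke : k = (pos.1 + dir.1, pos.2 + dir.2) := by simpa using hk'
          simp [hke]
      · intro hk
        apply (PySem.Set.contains_iff _ _).mpr
        have hk' : k = (pos.1 + dir.1, pos.2 + dir.2) ∨ v.contains k = true := by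
          cases he : (k == (pos.1 + dir.1, pos.2 + dir.2)) with
          | true => exact Or.inl (by simpa using he)
          | false => rw [he, Bool.false_or] at hk; exact Or.inr hk
        rcases hk' with hk' | hk'
        · subst hk'
          simp
        · exact List.mem_append.mpr (Or.inl (hmk.mpr hk'))
    · have hf : (PySem.Set.contains G (pos.1 + dir.1, pos.2 + dir.2)
          && !v.contains (pos.1 + dir.1, pos.2 + dir.2)) = false := Bool.eq_false_iff.mpr h
      have hfB : (PySem.Set.contains G (pos.1 + dir.1, pos.2 + dir.2)
          && !PySem.Set.contains vs (pos.1 + dir.1, pos.2 + dir.2)) = false := by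
        rw [hmem]; exact hf
      have hB : pvStepB G (acc, vs) (pos.1 + dir.1, pos.2 + dir.2) = (acc, vs) := by
        simp only [pvStepB]
        rw [if_neg]
        rw [hfB]
        exact Bool.false_ne_true
      have hA : pvStepA G pos (acc, v) dir = (acc, v) := by
        simp only [pvStepA]
        rw [if_neg h]
      rw [hB, hA]
      exact ih acc vs v hmem

-- B's node fold mirrors A's
theorem pvNodeB_eq (G : PySem.Set (Int × Int)) (pos : Int × Int)
    (acc : List (Int × Int)) (vs : PySem.Set (Int × Int)) (v : PySem.Dict (Int × Int) Int)
    (hmem : ∀ k, PySem.Set.contains vs k = v.contains k) :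
    (pvNodeB G (acc, vs) pos).1 = (pvNodeA G (acc, v) pos).1 ∧
    (∀ k, PySem.Set.contains (pvNodeB G (acc, vs) pos).2 k = (pvNodeA G (acc, v) pos).2.contains k) := by
  have hmap : pvNbrs pos = pvDirs.map (fun dir => (pos.1 + dir.1, pos.2 + dir.2)) := by
    simp [pvNbrs, pvDirs, sub_eq_add_neg]
  unfold pvNodeB pvNodeA
  rw [hmap, List.foldl_map]
  exact pvStepsBA G pos pvDirs acc vs v hmem

theorem pvLevelB_eq (G : PySem.Set (Int × Int)) (cur : List (Int × Int)) :
    ∀ (acc : List (Int × Int)) (vs : PySem.Set (Int × Int)) (v : PySem.Dict (Int × Int) Int),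
    (∀ k, PySem.Set.contains vs k = v.contains k) →
    (cur.foldl (pvNodeB G) (acc, vs)).1 = (cur.foldl (pvNodeA G) (acc, v)).1 ∧
    (∀ k, PySem.Set.contains (cur.foldl (pvNodeB G) (acc, vs)).2 k =
          (cur.foldl (pvNodeA G) (acc, v)).2.contains k) := by
  induction cur with
  | nil => intro acc vs v hmem; exact ⟨rfl, hmem⟩
  | cons pos cur ih =>
    intro acc vs v hmem
    simp only [List.foldl_cons]
    obtain ⟨h1, h2⟩ := pvNodeB_eq G pos acc vs v hmem
    have e : pvNodeB G (acc, vs) pos =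
        ((pvNodeA G (acc, v) pos).1, (pvNodeB G (acc, vs) pos).2) := by
      rw [← h1]
    rw [e]
    exact ih _ _ _ h2

-- the main correspondence: B's 64-round loop computes A's filtered count
theorem pvMain (G : PySem.Set (Int × Int)) :
    ∀ (n : Nat) (s : Int), s = 65 - (n : Int) → 1 ≤ s →
    ∀ (cur : List (Int × Int)) (v : PySem.Dict (Int × Int) Int)
      (vs : PySem.Set (Int × Int)) (total : Int),
    (∀ k, PySem.Set.contains vs k = v.contains k) →
    (∀ c ∈ cur, v.get? c = some (s - 1)) →
    total = pvCountf v.values →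
    ((PySem.List.pyRange s 65 1).foldl (pvOuterB G) (cur, vs, total)).2.2 =
      pvCountf (pvLevels G cur [] v (s - 1)).values := by
  intro n
  induction n with
  | zero =>
    intro s hs h1 cur v vs total hmem hcur htot
    have hs65 : s = 65 := by push_cast at hs; omega
    subst hs65
    rw [PySem.List.pyRange_one_eq_nil (le_refl 65), List.foldl_nil]
    rw [htot]
    exact (pvLevels_tail G cur [] v (65 - 1) (by norm_num) hcur (by intro x hx; simp at hx)).symm
  | succ n ih =>
    intro s hs h1 cur v vs total hmem hcur htot
    have hn0 : (0 : Int) ≤ (n : Int) := Int.natCast_nonneg n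
    have hcast : ((n + 1 : Nat) : Int) = (n : Int) + 1 := by push_cast; ring
    rw [hcast] at hs
    have hlt : s < 65 := by omega
    rw [PySem.List.pyRange_one_cons hlt, List.foldl_cons]
    obtain ⟨hfr1, hfr2⟩ := pvLevelB_eq G cur [] vs v hmem
    have houter : pvOuterB G (cur, vs, total) s =
        ((cur.foldl (pvNodeA G) ([], v)).1, (cur.foldl (pvNodeB G) ([], vs)).2,
         total + if PySem.Int.mod s 2 == 0
           then ((cur.foldl (pvNodeA G) ([], v)).1.length : Int) else 0) := by
      simp only [pvOuterB]
      rw [hfr1]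
    obtain ⟨hp, hv, new, h1n, h2n⟩ :=
      pvLevelA_inv G (s - 1) v cur ([], v) hcur (fun k x hk => hk) (by intro x hx; simp at hx)
    have hnew : new = (cur.foldl (pvNodeA G) ([], v)).1 := by simpa using h1n.symm
    have hs1 : s - 1 + 1 = s := by ring
    have hAside : pvLevels G cur [] v (s - 1) =
        pvLevels G (cur.foldl (pvNodeA G) ([], v)).1 [] (cur.foldl (pvNodeA G) ([], v)).2 s := by
      rw [pvLevels_level G cur [] v (s - 1), pvLevels_shift, hs1]
    have hcnt : pvCountf (cur.foldl (pvNodeA G) ([], v)).2.values =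
        pvCountf v.values + (if PySem.Int.mod s 2 == 0
          then ((cur.foldl (pvNodeA G) ([], v)).1.length : Int) else 0) := by
      rw [show (cur.foldl (pvNodeA G) ([], v)).2.values =
          v.values ++ List.replicate new.length (s - 1 + 1) from h2n]
      rw [hs1, hnew]
      unfold pvCountf
      rw [List.countP_append]
      by_cases hmod : (PySem.Int.mod s 2 == 0) = true
      · have hdec : decide (s ≤ 64) = true := decide_eq_true (by omega)
        have hall : (List.replicate (cur.foldl (pvNodeA G) ([], v)).1.length s).countP
            (fun x => PySem.Int.mod x 2 == 0 && decide (x ≤ 64)) =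
            (cur.foldl (pvNodeA G) ([], v)).1.length := by
          have hall' := List.countP_eq_length.mpr (by
            intro a ha
            have ha' : a = s := List.eq_of_mem_replicate ha
            subst ha'
            rw [hmod, hdec]
            rfl :
            ∀ a ∈ List.replicate (cur.foldl (pvNodeA G) ([], v)).1.length s,
              (PySem.Int.mod a 2 == 0 && decide (a ≤ 64)) = true)
          rw [List.length_replicate] at hall'
          exact hall'
        rw [hall, if_pos hmod]
        push_cast
        ring
      · have hmodf : (PySem.Int.mod s 2 == 0) = false := Bool.eq_false_iff.mpr hmod
        have hzero : (List.replicate (cur.foldl (pvNodeA G) ([], v)).1.length s).countP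
            (fun x => PySem.Int.mod x 2 == 0 && decide (x ≤ 64)) = 0 := by
          rw [List.countP_eq_zero]
          intro a ha
          have ha' : a = s := List.eq_of_mem_replicate ha
          subst ha'
          simp only [hmodf, Bool.false_and]
          exact Bool.false_ne_true
        rw [hzero, if_neg hmod]
        push_cast
        ring
    have hcur' : ∀ c ∈ (cur.foldl (pvNodeA G) ([], v)).1,
        (cur.foldl (pvNodeA G) ([], v)).2.get? c = some (s + 1 - 1) := by
      intro c hc
      have hvc := hv c hc
      rw [hs1] at hvc
      rw [show s + 1 - 1 = s from by ring]
      exact hvc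
    have ihx := ih (s + 1) (by omega) (by omega)
      (cur.foldl (pvNodeA G) ([], v)).1 (cur.foldl (pvNodeA G) ([], v)).2
      (cur.foldl (pvNodeB G) ([], vs)).2
      (total + if PySem.Int.mod s 2 == 0
        then ((cur.foldl (pvNodeA G) ([], v)).1.length : Int) else 0)
      hfr2 hcur' (by rw [htot, hcnt])
    rw [houter]
    rw [show s + 1 - 1 = s from by ring] at ihx
    rw [hAside]
    exact ihx

-- ===== VERDICT (by name: the statement is the Claim_ definition above) =====
theorem part1_spec : Claim_equal_part1 := by
  intro data hdom hpre
  show part1 data = part1_alt data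
  simp only [part1, part1_alt]
  rw [← pvParse_eq]
  have hsome := pvParseA_isSome data hpre
  cases hp : (pvParseA data).1 with
  | none => simp [hp] at hsome
  | some s =>
    dsimp only
    have hD : (PySem.Dict.empty.insert s (0 : Int)).get? s = some 0 :=
      PySem.Dict.get?_insert_self _ _ _
    have hcur0 : ∀ c ∈ [s], (PySem.Dict.empty.insert s (0 : Int)).get? c = some 0 := by
      intro c hc
      have hce : c = s := by simpa using hc
      subst hce
      exact hD
    have hA := pvBfsA_eq_pvLevels (pvParseA data).2 [s] []
      (PySem.Dict.empty.insert s 0) 0 hcur0 (by intro x hx; simp at hx)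
    rw [List.append_nil] at hA
    rw [hA]
    have hmem0 : ∀ k, PySem.Set.contains (PySem.Set.ofList [s]) k =
        (PySem.Dict.empty.insert s (0 : Int)).contains k := by
      intro k
      have hof : PySem.Set.ofList [s] = [s] :=
        PySem.Set.ofList_eq_self_of_nodup [s] (List.nodup_singleton s)
      rw [hof, PySem.Dict.contains_insert, Bool.eq_iff_iff]
      constructor
      · intro hk
        have hke : k = s := by simpa using (PySem.Set.contains_iff _ _).mp hk
        simp [hke]
      · intro hk
        rw [PySem.Dict.contains_empty, Bool.or_false] at hk
        have hke : k = s := by simpa using hk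
        subst hke
        exact (PySem.Set.contains_iff _ _).mpr (by simp)
    have hval : (PySem.Dict.empty.insert s (0 : Int)).values = [0] := by
      simp only [PySem.Dict.values]
      rw [PySem.Dict.items_insert_of_not_contains _ _ (PySem.Dict.contains_empty _)]
      rfl
    have htot0 : (1 : Int) = pvCountf (PySem.Dict.empty.insert s (0 : Int)).values := by
      rw [hval]; decide
    have hcur1 : ∀ c ∈ [s], (PySem.Dict.empty.insert s (0 : Int)).get? c = some (1 - 1) := by
      intro c hc
      have hce : c = s := by simpa using hc
      subst hce
      simpa using hD
    have hM := pvMain (pvParseA data).2 64 1 (by norm_num) (by norm_num) [s]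
      (PySem.Dict.empty.insert s 0) (PySem.Set.ofList [s]) 1 hmem0 hcur1 htot0
    rw [show (1 : Int) - 1 = 0 from by norm_num] at hM
    exact hM.symm
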